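-- pv_equiv track=rewrite | github.com/nfeibel/Python | Number-and-Item-Processor/nfeibel_202_P3.py | box_sort
-- ===== SOURCE A (Python) =====
-- def box_sort(names, sizes):
--
-- 	#Below we initialize the boxList with the 0-3 index lists.
-- 	boxList = [[],[],[],[]]
--
-- 	#Below we iterate over the names and the if statement within
-- 	#it sorts the names into boxList based on their respective
-- 	#sizes.
-- 	for i in range(len(names)):
-- 		if sizes[i] <= 2:
-- 			boxList[0].append(names[i])
-- 		elif sizes[i] <= 5:
-- 			boxList[1].append(names[i])
-- 		elif sizes[i] <= 25:
-- 			boxList[2].append(names[i])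
-- 		elif sizes[i] <= 50:
-- 			boxList[3].append(names[i])
--
-- 	#Once we have iterated over all the names, we return the boxList.
-- 	return boxList
-- ===== SOURCE B (Python) =====
-- def box_sort(names, sizes):
--     # Binary search over a threshold table instead of the if/elif cascade.
--     bounds = [2, 5, 25, 50]
--     boxList = [[], [], [], []]
--     for i in range(len(names)):
--         s = sizes[i]
--         # bisect_left(bounds, s): first index j with s <= bounds[j]
--         lo, hi = 0, 4
--         while lo < hi:
--             mid = (lo + hi) // 2
--             if bounds[mid] < s:
--                 lo = mid + 1
--             else:
--                 hi = mid
--         if lo < 4: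
--             boxList[lo].append(names[i])
--     return boxList
-- ===== Notes on version B (the rewrite author's own statement) =====
-- stated objective: alternative
-- what changed: Replaces the if/elif threshold cascade with a binary search (bisect_left) over a bucket-boundary table [2,5,25,50], appending into boxList[idx] only when idx < 4.
import Mathlib
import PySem

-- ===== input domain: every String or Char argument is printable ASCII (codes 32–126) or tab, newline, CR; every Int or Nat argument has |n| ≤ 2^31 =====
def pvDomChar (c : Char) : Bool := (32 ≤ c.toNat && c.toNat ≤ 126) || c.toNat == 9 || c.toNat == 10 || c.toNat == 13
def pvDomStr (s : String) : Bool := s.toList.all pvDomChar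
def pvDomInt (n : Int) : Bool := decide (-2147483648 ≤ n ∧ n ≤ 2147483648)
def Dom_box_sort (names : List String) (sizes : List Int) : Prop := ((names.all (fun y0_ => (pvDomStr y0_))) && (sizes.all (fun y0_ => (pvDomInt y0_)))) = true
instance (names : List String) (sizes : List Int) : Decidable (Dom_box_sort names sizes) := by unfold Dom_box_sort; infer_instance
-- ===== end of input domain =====

-- B replaces A's if/elif threshold cascade with a binary search over a bucket-boundary table (alternative structure, same cost).


-- ===== PORT A =====
-- boxList[k].append(x)
def pvAppendAt (bl : List (List String)) (k : Nat) (x : String) : List (List String) :=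
  bl.set k ((bl.getD k []) ++ [x])

-- literal port of A's loop: if/elif cascade over the size at index i
-- (sizes[i]/names[i] read via pyGetD; under Pre_box_sort the index is always in range)
def box_sort (names : List String) (sizes : List Int) : List (List String) :=
  (PySem.List.pyRange 0 (names.length : Int) 1).foldl
    (fun bl i =>
      let s := PySem.List.pyGetD sizes i 0
      if s ≤ 2 then pvAppendAt bl 0 (PySem.List.pyGetD names i "")
      else if s ≤ 5 then pvAppendAt bl 1 (PySem.List.pyGetD names i "")
      else if s ≤ 25 then pvAppendAt bl 2 (PySem.List.pyGetD names i "")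
      else if s ≤ 50 then pvAppendAt bl 3 (PySem.List.pyGetD names i "")
      else bl)
    [[],[],[],[]]

-- ===== PORT B =====
-- Source B's hand-written bisect_left: binary search on the bounds table
def pvBisectLeft (bounds : List Int) (s : Int) (lo hi : Nat) : Nat :=
  if lo < hi then
    let mid := (lo + hi) / 2
    if PySem.List.pyGetD bounds (mid : Int) 0 < s then pvBisectLeft bounds s (mid + 1) hi
    else pvBisectLeft bounds s lo mid
  else lo
termination_by hi - lo
decreasing_by all_goals omega

def box_sort_alt (names : List String) (sizes : List Int) : List (List String) :=
  let bounds : List Int := [2, 5, 25, 50]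
  (PySem.List.pyRange 0 (names.length : Int) 1).foldl
    (fun bl i =>
      let s := PySem.List.pyGetD sizes i 0
      let lo := pvBisectLeft bounds s 0 4
      if lo < 4 then pvAppendAt bl lo (PySem.List.pyGetD names i "")
      else bl)
    [[],[],[],[]]

-- ===== PRECONDITION & SPEC =====
-- A raises IndexError when sizes is shorter than names; exactly those inputs are excluded.
def Pre_box_sort (names : List String) (sizes : List Int) : Prop :=
  names.length ≤ sizes.length
instance (names : List String) (sizes : List Int) : Decidable (Pre_box_sort names sizes) := by
  unfold Pre_box_sort; infer_instance

def pvWitness_box_sort : List String × List Int :=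
  (["a", "b", "c"], [1, 30, 99])

def Spec_box_sort (names : List String) (sizes : List Int) (out : List (List String)) : Prop := out = box_sort_alt names sizes
instance (names : List String) (sizes : List Int) (out : List (List String)) : Decidable (Spec_box_sort names sizes out) := by unfold Spec_box_sort; infer_instance

-- ===== CLAIM (what is proved, stated in full; the proofs are below) =====
def Claim_equal_box_sort : Prop := ∀ (names : List String) (sizes : List Int), Dom_box_sort names sizes → Pre_box_sort names sizes → Spec_box_sort names sizes (box_sort names sizes)

-- ===== LEMMAS AND PROOFS =====

theorem pvBisectLeft_eval (s : Int) :
    pvBisectLeft [2, 5, 25, 50] s 0 4 =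
      (if s ≤ 2 then 0 else if s ≤ 5 then 1 else if s ≤ 25 then 2 else if s ≤ 50 then 3 else 4) := by
  have step : ∀ lo hi : Nat, lo < hi →
      pvBisectLeft [2,5,25,50] s lo hi =
        if PySem.List.pyGetD [2,5,25,50] (((lo+hi)/2 : Nat) : Int) 0 < s
        then pvBisectLeft [2,5,25,50] s ((lo+hi)/2+1) hi
        else pvBisectLeft [2,5,25,50] s lo ((lo+hi)/2) := by
    intro lo hi h
    rw [pvBisectLeft.eq_def]
    simp [h]
  have base : ∀ lo : Nat, pvBisectLeft [2,5,25,50] s lo lo = lo := by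
    intro lo; rw [pvBisectLeft.eq_def]; simp
  simp only [step 0 4 (by norm_num), step 0 2 (by norm_num), step 0 1 (by norm_num), step 3 4 (by norm_num)]
  norm_num [base,
    (by decide : PySem.List.pyGetD ([2,5,25,50] : List Int) 0 0 = 2),
    (by decide : PySem.List.pyGetD ([2,5,25,50] : List Int) 1 0 = 5),
    (by decide : PySem.List.pyGetD ([2,5,25,50] : List Int) 2 0 = 25),
    (by decide : PySem.List.pyGetD ([2,5,25,50] : List Int) 3 0 = 50)]
  split_ifs <;> omega

theorem box_sort_spec : Claim_equal_box_sort := by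
  intro names sizes _ _
  unfold Spec_box_sort box_sort box_sort_alt
  have hfun :
      (fun (bl : List (List String)) (i : Int) =>
        let s := PySem.List.pyGetD sizes i 0
        if s ≤ 2 then pvAppendAt bl 0 (PySem.List.pyGetD names i "")
        else if s ≤ 5 then pvAppendAt bl 1 (PySem.List.pyGetD names i "")
        else if s ≤ 25 then pvAppendAt bl 2 (PySem.List.pyGetD names i "")
        else if s ≤ 50 then pvAppendAt bl 3 (PySem.List.pyGetD names i "")
        else bl)
      = (fun (bl : List (List String)) (i : Int) =>
        let s := PySem.List.pyGetD sizes i 0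
        let lo := pvBisectLeft [2, 5, 25, 50] s 0 4
        if lo < 4 then pvAppendAt bl lo (PySem.List.pyGetD names i "")
        else bl) := by
    funext bl i
    simp only [pvBisectLeft_eval]
    by_cases h2 : PySem.List.pyGetD sizes i 0 ≤ 2 <;>
      by_cases h5 : PySem.List.pyGetD sizes i 0 ≤ 5 <;>
      by_cases h25 : PySem.List.pyGetD sizes i 0 ≤ 25 <;>
      by_cases h50 : PySem.List.pyGetD sizes i 0 ≤ 50 <;>
      (split_ifs <;> first | rfl | omega)
  rw [hfun]
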